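-- pv_equiv track=rewrite | github.com/wherby/code | algorithm/quickPow/matrixQuickPow.py | vecmul
-- ===== SOURCE A (Python) =====
-- def vecmul(v,mat,mod =10**9+7):
--     n = len(v)
--     w = [0]*n
--     for i in range(n):
--         vi = v[i]
--         if vi:
--             Ai = mat[i]
--             for j in range(n):
--                 w[j] = (w[j] + vi * Ai[j]) % mod
--     return w
-- ===== SOURCE B (Python) =====
-- def vecmul(v, mat, mod=10**9 + 7):
--     pairs = [(vi, row) for vi, row in zip(v, mat) if vi]
--     return [sum(vi * row[j] for vi, row in pairs) % mod for j in range(len(v))]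
-- ===== Notes on version B (the rewrite author's own statement) =====
-- stated objective: alternative
-- what changed: Replaces A's row-scatter (update the whole partial vector, with a mod at every step, once per nonzero row) by a column-gather: filter the nonzero (v[i], row) pairs once, then compute each output entry as a single dot product with one final mod.
-- outside the precondition, e.g. on vecmul([0], [[1]], 0): A returns [0], B raises ZeroDivisionError
import Mathlib
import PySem

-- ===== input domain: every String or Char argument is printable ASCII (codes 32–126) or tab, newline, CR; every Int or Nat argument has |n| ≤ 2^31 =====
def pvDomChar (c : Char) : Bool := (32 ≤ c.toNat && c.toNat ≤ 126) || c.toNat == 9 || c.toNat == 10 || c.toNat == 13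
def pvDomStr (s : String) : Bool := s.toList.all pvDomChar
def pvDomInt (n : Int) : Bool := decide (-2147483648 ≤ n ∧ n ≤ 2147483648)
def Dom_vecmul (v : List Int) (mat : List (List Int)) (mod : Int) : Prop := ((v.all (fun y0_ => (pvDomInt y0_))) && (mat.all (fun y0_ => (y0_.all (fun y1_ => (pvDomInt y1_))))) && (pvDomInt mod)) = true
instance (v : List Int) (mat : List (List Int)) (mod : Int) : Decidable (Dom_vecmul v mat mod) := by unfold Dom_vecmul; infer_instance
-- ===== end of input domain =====

-- B computes each output entry as one column dot product with a single final mod, instead of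
-- A's row-scatter that updates the whole partial vector (with a mod per step) per row:
-- alternative decomposition, same asymptotic cost.

-- ===== PORT A =====
-- literal transliteration of A: w = [0]*n, row-scatter loop with per-step mod, skipping zero v[i]
def vecmul (v : List Int) (mat : List (List Int)) (mod : Int) : List Int :=
  let n := v.length
  (List.range n).foldl (fun w i =>
    let vi := v.getD i 0
    if vi ≠ 0 then
      let Ai := mat.getD i []
      (List.range n).foldl (fun w j =>
        w.set j (PySem.Int.mod (w.getD j 0 + vi * Ai.getD j 0) mod)) w
    else w) (List.replicate n 0)

-- ===== PORT B =====
-- literal transliteration of B: keep the nonzero (vi,row) pairs of zip(v,mat),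
-- then one dot product per output index j, mod applied once
def vecmul_alt (v : List Int) (mat : List (List Int)) (mod : Int) : List Int :=
  let pairs := (v.zip mat).filter (fun p => p.1 != 0)
  (List.range v.length).map (fun j =>
    PySem.Int.mod (pairs.foldl (fun s p => s + p.1 * p.2.getD j 0) 0) mod)

-- ===== PRECONDITION & SPEC =====
-- Pre_ excludes exactly the inputs where the Python A raises: mod = 0 (ZeroDivisionError at the
-- first update; A returns [0]*n there only when every v[i] is zero, a case where B's own
-- per-column mod raises too, so it is excluded as well — see cites), and missing/short mat rows
-- reached through a nonzero v[i] (IndexError).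
def Pre_vecmul (v : List Int) (mat : List (List Int)) (mod : Int) : Prop :=
  mod ≠ 0 ∧ ∀ i < v.length, v.getD i 0 ≠ 0 → (i < mat.length ∧ v.length ≤ (mat.getD i []).length)
instance (v : List Int) (mat : List (List Int)) (mod : Int) : Decidable (Pre_vecmul v mat mod) := by
  unfold Pre_vecmul; infer_instance

def pvWitness_vecmul : List Int × List (List Int) × Int := ([1, 0, -2], [[1, 2, 3], [9, 9], [4, 5, 6]], 7)

def Spec_vecmul (v : List Int) (mat : List (List Int)) (mod : Int) (out : List Int) : Prop := out = vecmul_alt v mat mod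
instance (v : List Int) (mat : List (List Int)) (mod : Int) (out : List Int) : Decidable (Spec_vecmul v mat mod out) := by unfold Spec_vecmul; infer_instance

-- ===== CLAIM (what is proved, stated in full; the proofs are below) =====
def Claim_equal_vecmul : Prop := ∀ (v : List Int) (mat : List (List Int)) (mod : Int), Dom_vecmul v mat mod → Pre_vecmul v mat mod → Spec_vecmul v mat mod (vecmul v mat mod)

-- ===== LEMMAS AND PROOFS =====

-- dot-product accumulator of B
def Sdot (l : List (Int × List Int)) (j : Nat) : Int :=
  l.foldl (fun s p => s + p.1 * p.2.getD j 0) 0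

theorem Sdot_append (l : List (Int × List Int)) (p : Int × List Int) (j : Nat) :
    Sdot (l ++ [p]) j = Sdot l j + p.1 * p.2.getD j 0 := by
  simp [Sdot, List.foldl_append]

-- Python's % is floor mod; adding after reducing equals reducing once (any modulus)
theorem fmod_add_left (s x m : Int) : ((Int.fmod s m) + x).fmod m = (s + x).fmod m := by
  conv_rhs => rw [← Int.fmod_add_mul_fdiv s m]
  rw [add_right_comm, Int.add_mul_fmod_self_left]

theorem pymod_add_left (s x m : Int) :
    PySem.Int.mod (PySem.Int.mod s m + x) m = PySem.Int.mod (s + x) m := by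
  show ((Int.fmod s m) + x).fmod m = (s + x).fmod m
  exact fmod_add_left s x m

theorem getD_map_range (n : Nat) (f : Nat → Int) (j : Nat) (d : Int) :
    (((List.range n).map f).getD j d) = if j < n then f j else d := by
  rcases Nat.lt_or_ge j n with h | h
  · rw [List.getD_eq_getElem _ _ (by simpa using h)]
    simp [h]
  · rw [List.getD_eq_default _ _ (by simpa using h)]
    simp [Nat.not_lt.mpr h]

-- the inner scatter loop of A, run on a list that is a map over range n,
-- rewrites every entry once
theorem inner_fold_aux (n : Nat) (f : Nat → Int) (h : Int → Nat → Int) :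
    ∀ k, k ≤ n →
      (List.range k).foldl (fun w j => w.set j (h (w.getD j 0) j)) ((List.range n).map f)
      = (List.range n).map (fun j => if j < k then h (f j) j else f j) := by
  intro k
  induction k with
  | zero => intro _; simp
  | succ k ih =>
    intro hk
    rw [List.range_succ, List.foldl_append, ih (Nat.le_of_succ_le hk)]
    simp only [List.foldl_cons, List.foldl_nil]
    rw [getD_map_range]
    have hkn : k < n := hk
    simp only [hkn, if_pos, Nat.lt_irrefl]
    apply List.ext_getElem
    · simp
    · intro i hi1 hi2
      simp only [List.getElem_set, List.getElem_map, List.getElem_range]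
      have hin : i < n := by simpa using hi2
      by_cases hik : k = i
      · subst hik
        simp
      · have : (i < k + 1) = (i < k) := by
          apply propext; constructor
          · intro h'; omega
          · intro h'; omega
        simp [hik, this]

theorem inner_fold (n : Nat) (f : Nat → Int) (h : Int → Nat → Int) :
    (List.range n).foldl (fun w j => w.set j (h (w.getD j 0) j)) ((List.range n).map f)
    = (List.range n).map (fun j => h (f j) j) := by
  rw [inner_fold_aux n f h n (Nat.le_refl n)]
  apply List.map_congr_left
  intro j hj
  simp [List.mem_range.mp hj]

-- outer invariant: after processing rows 0..k-1, A's vector is B's column form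
-- restricted to the first k pairs
theorem outer_inv (v : List Int) (mat : List (List Int)) (m : Int) :
    ∀ k,
      (List.range k).foldl (fun w i =>
        let vi := v.getD i 0
        if vi ≠ 0 then
          let Ai := mat.getD i []
          (List.range v.length).foldl (fun w j =>
            w.set j (PySem.Int.mod (w.getD j 0 + vi * Ai.getD j 0) m)) w
        else w) (List.replicate v.length 0)
      = (List.range v.length).map (fun j =>
          PySem.Int.mod (Sdot (((v.zip mat).take k).filter (fun p => p.1 != 0)) j) m) := by
  intro k
  induction k with
  | zero =>
    apply List.ext_getElem
    · simp
    · intro i h1 h2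
      simp [Sdot, PySem.Int.mod, Int.zero_fmod]
  | succ k ih =>
    rw [List.range_succ, List.foldl_append, ih]
    simp only [List.foldl_cons, List.foldl_nil]
    by_cases hz : v.getD k 0 = 0
    · rw [if_neg (not_not_intro hz)]
      have hfil : List.filter (fun p => p.1 != 0) ((v.zip mat).take (k + 1))
          = List.filter (fun p => p.1 != 0) ((v.zip mat).take k) := by
        by_cases hk : k < (v.zip mat).length
        · have hvk : k < v.length := lt_of_lt_of_le hk (by rw [List.length_zip]; omega)
          have hv0 : v[k] = (0 : Int) := by rw [← List.getD_eq_getElem v 0 hvk]; exact hz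
          rw [List.take_succ_eq_append_getElem hk, List.filter_append]
          simp [List.getElem_zip, hv0]
        · rw [List.take_of_length_le (by omega), List.take_of_length_le (by omega)]
      rw [hfil]
    · rw [if_pos hz]
      rw [inner_fold v.length
            (fun j => PySem.Int.mod (Sdot (((v.zip mat).take k).filter (fun p => p.1 != 0)) j) m)
            (fun s j => PySem.Int.mod (s + v.getD k 0 * (mat.getD k []).getD j 0) m)]
      apply List.map_congr_left
      intro j _
      rw [pymod_add_left]
      by_cases hk : k < (v.zip mat).length
      · have htake : (v.zip mat).take (k + 1) = (v.zip mat).take k ++ [(v.zip mat)[k]] :=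
          List.take_succ_eq_append_getElem hk
        have hvk : k < v.length := lt_of_lt_of_le hk (by rw [List.length_zip]; omega)
        have hmk : k < mat.length := lt_of_lt_of_le hk (by rw [List.length_zip]; omega)
        have hget : (v.zip mat)[k] = (v.getD k 0, mat.getD k []) := by
          rw [List.getElem_zip]
          rw [List.getD_eq_getElem v 0 hvk, List.getD_eq_getElem mat [] hmk]
        rw [htake, hget, List.filter_append]
        have hb : (v.getD k 0) != 0 := by simpa using hz
        simp only [List.filter_cons, hb, List.filter_nil, if_pos]
        rw [Sdot_append]
      · -- k beyond the zip: mat row defaults to [], contribution is 0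
        have htake : (v.zip mat).take (k + 1) = (v.zip mat).take k := by
          rw [List.take_of_length_le (by omega), List.take_of_length_le (by omega)]
        have hrow : mat.getD k [] = [] := by
          apply List.getD_eq_default
          by_contra hm
          have hvk : k < v.length := by
            by_contra hv
            exact hz (List.getD_eq_default v 0 (by omega))
          exact hk (by rw [List.length_zip]; omega)
        rw [htake, hrow]
        simp [List.getD]

-- ===== VERDICT (by name: the statement is the Claim_ definition above) =====
theorem vecmul_spec : Claim_equal_vecmul := by
  intro v mat m _ _
  show vecmul v mat m = vecmul_alt v mat m
  unfold vecmul vecmul_alt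
  rw [outer_inv v mat m v.length]
  have htake : (v.zip mat).take v.length = v.zip mat :=
    List.take_of_length_le (by rw [List.length_zip]; omega)
  rw [htake]
  rfl
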